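-- pv_equiv track=rewrite | github.com/FlorianLeprevost/Compu_Neuro | final_reprod_v7.py | f_disco
-- ===== SOURCE A (Python) =====
-- def f_disco(time_ms):
--     ts=list()
--     point=1
--     for i in range(time_ms):
--         ts.append(point)
--         if i%100==0:
--             point=-point
--     return ts
-- ===== SOURCE B (Python) =====
-- def f_disco(time_ms):
--     # closed form: sign at index i is (-1)**ceil(i/100) = (-1)**((i+99)//100)
--     return [(-1) ** ((i + 99) // 100) for i in range(time_ms)]
-- ===== Notes on version B (the rewrite author's own statement) =====
-- stated objective: simpler
-- what changed: Replaces the stateful loop that carries and conditionally flips a running sign with a stateless comprehension computing each element directly from its index as a closed-form power with exponent (i+99)//100.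
import Mathlib
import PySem

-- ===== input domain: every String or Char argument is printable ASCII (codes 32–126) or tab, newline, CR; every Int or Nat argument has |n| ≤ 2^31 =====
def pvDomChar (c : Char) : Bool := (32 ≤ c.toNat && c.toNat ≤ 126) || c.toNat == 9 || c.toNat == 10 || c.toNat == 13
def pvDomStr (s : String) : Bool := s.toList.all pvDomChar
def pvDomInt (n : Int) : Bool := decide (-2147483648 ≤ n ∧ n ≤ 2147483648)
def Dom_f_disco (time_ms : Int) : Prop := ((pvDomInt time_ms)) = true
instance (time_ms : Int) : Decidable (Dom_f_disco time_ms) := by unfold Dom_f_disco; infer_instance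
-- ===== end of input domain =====

-- B replaces A's stateful sign-flipping loop by a stateless closed form per index (objective: simpler).

-- ===== PORT A =====
def f_disco (time_ms : Int) : List Int :=
  ((PySem.List.pyRange 0 time_ms 1).foldl
    (fun (st : List Int × Int) i =>
      (st.1 ++ [st.2], if PySem.Int.mod i 100 == 0 then -st.2 else st.2))
    ([], 1)).1

-- ===== PORT B =====
-- (-1)**e : the exponent (i+99)//100 is ≥ 0 for every i produced by range(time_ms),
-- so the .toNat conversion is exact there.
def f_disco_alt (time_ms : Int) : List Int :=
  (PySem.List.pyRange 0 time_ms 1).map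
    (fun i => (-1 : Int) ^ (PySem.Int.floordiv (i + 99) 100).toNat)

-- ===== PRECONDITION & SPEC =====
def Spec_f_disco (time_ms : Int) (out : List Int) : Prop := out = f_disco_alt time_ms
instance (time_ms : Int) (out : List Int) : Decidable (Spec_f_disco time_ms out) := by unfold Spec_f_disco; infer_instance

-- ===== CLAIM (what is proved, stated in full; the proofs are below) =====
def Claim_equal_f_disco : Prop := ∀ (time_ms : Int), Dom_f_disco time_ms → Spec_f_disco time_ms (f_disco time_ms)

-- ===== LEMMAS AND PROOFS =====

theorem f_disco_fold_inv (n : Nat) :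
    (PySem.List.pyRange 0 (n : Int) 1).foldl
      (fun (st : List Int × Int) i =>
        (st.1 ++ [st.2], if PySem.Int.mod i 100 == 0 then -st.2 else st.2))
      ([], 1)
    = (f_disco_alt (n : Int), (-1 : Int) ^ ((n + 99) / 100)) := by
  induction n with
  | zero =>
      simp [f_disco_alt, PySem.List.pyRange_one_eq_nil]
  | succ n ih =>
      have hsplit : PySem.List.pyRange 0 ((n : Int) + 1) 1
          = PySem.List.pyRange 0 (n : Int) 1 ++ [(n : Int)] :=
        PySem.List.pyRange_one_succ_right (by omega)
      have haltsplit : f_disco_alt ((n : Int) + 1)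
          = f_disco_alt (n : Int) ++ [(-1 : Int) ^ ((n + 99) / 100)] := by
        simp [f_disco_alt, hsplit]
        congr 1 <;> omega
      have hmod : PySem.Int.mod (n : Int) 100 = ((n % 100 : Nat) : Int) :=
        PySem.Int.mod_natCast n 100
      push_cast
      rw [hsplit, List.foldl_append, ih]
      simp only [List.foldl_cons, List.foldl_nil, haltsplit, hmod]
      by_cases h : n % 100 = 0
      · have he : (n + 1 + 99) / 100 = (n + 99) / 100 + 1 := by omega
        simp [h, he, pow_succ]
      · have he : (n + 1 + 99) / 100 = (n + 99) / 100 := by omega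
        have hnd : ¬ ((100 : Int) ∣ (n : Int)) := by omega
        simp [he]
        intro hd
        exact absurd hd hnd

-- ===== VERDICT (by name: the statement is the Claim_ definition above) =====
theorem f_disco_spec : Claim_equal_f_disco := by
  intro time_ms _
  unfold Spec_f_disco
  by_cases h : time_ms ≤ 0
  · simp [f_disco, f_disco_alt, PySem.List.pyRange_one_eq_nil h]
  · obtain ⟨n, rfl⟩ := Int.eq_ofNat_of_zero_le (by omega : (0:Int) ≤ time_ms)
    unfold f_disco
    rw [f_disco_fold_inv]
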